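-- pv_equiv track=rewrite | github.com/thiagonoft/geradordescanner-uff | geradordescanner.py | preprocess_string
-- ===== SOURCE A (Python) =====
-- def preprocess_string(basic_code):
--     # Separar cada linha para tratamento individual
--     lines = basic_code.strip().split('\n')
--     processed_lines = []
--
--     for line in lines:
--         # Ignorar comentários
--         if 'REM' in line:
--             continue
--
--         # Substituir espaços em strings por '_'
--         in_quote = False
--         processed_line = ""
--         quote_content = ""
--         for char in line:
--             if char == '"':
--                 if not in_quote:
--                     in_quote = True
--                     processed_line += '"'
--                 else:
--                     in_quote = False
--                     processed_line += quote_content.replace(" ", "_") + '"'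
--                     quote_content = ""
--             elif in_quote:
--                 quote_content += char
--             else:
--                 processed_line += char
--
--         # Adicionar espaços antes e depois de operadores e delimitadores
--         delimiters = ['+', '-', '*', '/', '^', '=', '<', '>', ',', '(', ')', ':']
--         buffer = ""
--         new_line = ""
--         for char in processed_line:
--             if char in delimiters:
--                 new_line += ' ' + buffer + ' ' + char + ' '
--                 buffer = ""
--             else:
--                 buffer += char
--         new_line += buffer
--
--         # Normalizar espaços múltiplos para um único espaço e trim espaços extra
--         processed_line = ' '.join(new_line.split())
--         processed_lines.append(processed_line)
--
--     return ' \\n '.join(processed_lines)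
-- ===== SOURCE B (Python) =====
-- # B: per line, fix quoted strings by splitting on '"' (even segments verbatim, odd
-- # segments get spaces->'_'; an unterminated final segment keeps only its opening quote),
-- # then pad delimiters with one str.translate pass and renormalize with split/join.
--
-- def _clean_line(line):
--     parts = line.split('"')
--     n = len(parts)
--     pieces = []
--     for i, seg in enumerate(parts):
--         if i % 2 == 0:
--             pieces.append(seg)
--         elif i == n - 1:
--             pieces.append('"')  # unterminated quote: opening quote kept, content dropped
--         else:
--             pieces.append('"' + seg.replace(' ', '_') + '"')
--     padded = ''.join(pieces).translate(_TABLE)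
--     return ' '.join(padded.split())
--
-- _TABLE = str.maketrans({c: ' ' + c + ' ' for c in '+-*/^=<>,():'})
--
-- def preprocess_string(basic_code):
--     return ' \\n '.join(
--         _clean_line(line)
--         for line in basic_code.strip().split('\n')
--         if 'REM' not in line)
-- ===== Notes on version B (the rewrite author's own statement) =====
-- stated objective: faster
-- what changed: The char-by-char quote state machine is replaced by splitting each line on the quote character and rewriting whole segments by index parity (an unterminated final segment keeps only its opening quote), and the buffered delimiter loop plus renormalization is replaced by one str.translate pass that pads every delimiter, followed by a split/join normalization.
import Mathlib
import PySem

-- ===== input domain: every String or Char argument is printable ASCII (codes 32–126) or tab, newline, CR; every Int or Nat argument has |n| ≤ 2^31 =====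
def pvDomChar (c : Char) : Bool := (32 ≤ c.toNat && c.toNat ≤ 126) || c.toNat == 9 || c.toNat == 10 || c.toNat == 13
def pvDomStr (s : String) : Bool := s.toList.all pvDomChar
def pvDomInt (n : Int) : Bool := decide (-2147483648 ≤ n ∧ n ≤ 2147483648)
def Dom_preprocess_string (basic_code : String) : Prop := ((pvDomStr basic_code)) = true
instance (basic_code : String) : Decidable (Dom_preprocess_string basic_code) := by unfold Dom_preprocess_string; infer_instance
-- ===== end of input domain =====

-- B replaces A's char-by-char quote state machine by a split-on-'"' segment pass and A's
-- buffered delimiter loop by a single translate-style expansion pass (measured faster: it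
-- replaces A's per-character Python-level loops and string appends with bulk split/translate/join).

-- ===== PORT A =====
def preprocess_string (basic_code : String) : String :=
  let lines := PySem.Chars.splitOn (PySem.Chars.strip basic_code.toList) ['\n']
  let processed_lines := lines.foldl (fun acc line =>
    if PySem.Chars.isIn ['R','E','M'] line then acc   -- 'REM' in line → continue
    else
      -- quote pass: state (in_quote, processed_line, quote_content)
      let st := line.foldl (fun (st : Bool × List Char × List Char) char =>
        if char = '"' then
          if !st.1 then (true, st.2.1 ++ ['"'], st.2.2)
          else (false, st.2.1 ++ PySem.Chars.replace st.2.2 [' '] ['_'] ++ ['"'], [])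
        else if st.1 then (st.1, st.2.1, st.2.2 ++ [char])
        else (st.1, st.2.1 ++ [char], st.2.2)) (false, [], [])
      let processed_line := st.2.1
      -- delimiter pass: state (buffer, new_line)
      let st2 := processed_line.foldl (fun (st : List Char × List Char) char =>
        if (['+','-','*','/','^','=','<','>',',','(',')',':'] : List Char).contains char then
          ([], st.2 ++ [' '] ++ st.1 ++ [' ', char, ' '])
        else (st.1 ++ [char], st.2)) ([], [])
      let new_line := st2.2 ++ st2.1
      acc ++ [PySem.Chars.join [' '] (PySem.Chars.split₀ new_line)]) []
  String.ofList (PySem.Chars.join [' ', '\\', 'n', ' '] processed_lines)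

-- ===== PORT B =====
-- helper = Source B's _clean_line
def altCleanLine (line : List Char) : List Char :=
  -- parts = line.split('"'); pieces: even segments verbatim, unterminated last segment -> '"',
  -- other odd segments rewrapped with spaces -> '_'
  -- then ''.join(pieces).translate(table): each delimiter char expands to ' '+c+' ' (hand-port
  -- of str.translate, exact here: the table maps exactly these 12 ASCII chars to 3-char strings)
  -- and finally ' '.join(padded.split())
  PySem.Chars.join [' '] (PySem.Chars.split₀
    ((((line.splitOn '"').zipIdx.map (fun (seg, i) =>
        if i % 2 = 0 then seg
        else if i = (line.splitOn '"').length - 1 then ['"']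
        else '"' :: (PySem.Chars.replace seg [' '] ['_'] ++ ['"']))).flatten).flatMap
      (fun c => if (['+','-','*','/','^','=','<','>',',','(',')',':'] : List Char).contains c
                then [' ', c, ' '] else [c])))

def preprocess_string_alt (basic_code : String) : String :=
  String.ofList (PySem.Chars.join [' ', '\\', 'n', ' ']
    (((PySem.Chars.splitOn (PySem.Chars.strip basic_code.toList) ['\n']).filter
        (fun l => !PySem.Chars.isIn ['R','E','M'] l)).map altCleanLine))

-- ===== PRECONDITION & SPEC =====
def Spec_preprocess_string (basic_code : String) (out : String) : Prop := out = preprocess_string_alt basic_code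
instance (basic_code : String) (out : String) : Decidable (Spec_preprocess_string basic_code out) := by unfold Spec_preprocess_string; infer_instance

-- ===== CLAIM (what is proved, stated in full; the proofs are below) =====
def Claim_equal_preprocess_string : Prop := ∀ (basic_code : String), Dom_preprocess_string basic_code → Spec_preprocess_string basic_code (preprocess_string basic_code)

-- ===== LEMMAS AND PROOFS =====

-- abbreviation used throughout the proofs
def pvDelims : List Char := ['+','-','*','/','^','=','<','>',',','(',')',':']

-- ---- the quote pass ----
-- recursive form of A's quote state machine (b = in_quote, qc = quote_content), returning processed_line
def pvQ : Bool → List Char → List Char → List Char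
  | _, [], _ => []
  | b, c :: cs, qc =>
    if c = '"' then
      if b then PySem.Chars.replace qc [' '] ['_'] ++ '"' :: pvQ false cs []
      else '"' :: pvQ true cs []
    else if b then pvQ true cs (qc ++ [c])
    else c :: pvQ false cs qc

-- the same result computed from the '"'-split parts (b = parity: inside a quote or not)
def pvG : Bool → List (List Char) → List Char
  | _, [] => []
  | b, p :: ps =>
    match ps with
    | [] => if b then [] else p
    | _ :: _ =>
      if b then PySem.Chars.replace p [' '] ['_'] ++ '"' :: pvG false ps
      else p ++ '"' :: pvG true ps

lemma pvQ_foldl (cs : List Char) : ∀ (b : Bool) (pl qc : List Char), (b = false → qc = []) →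
    (cs.foldl (fun (st : Bool × List Char × List Char) char =>
        if char = '"' then
          if !st.1 then (true, st.2.1 ++ ['"'], st.2.2)
          else (false, st.2.1 ++ PySem.Chars.replace st.2.2 [' '] ['_'] ++ ['"'], [])
        else if st.1 then (st.1, st.2.1, st.2.2 ++ [char])
        else (st.1, st.2.1 ++ [char], st.2.2)) (b, pl, qc)).2.1
      = pl ++ pvQ b cs qc := by
  induction cs with
  | nil => intro b pl qc _; simp [pvQ]
  | cons c cs ih =>
    intro b pl qc hinv
    rw [List.foldl_cons]
    by_cases hc : c = '"'
    · cases b <;>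
        simp only [hc, if_pos, reduceIte, Bool.not_false, Bool.not_true, if_true, if_false] <;>
        rw [ih _ _ _ (by simp_all)] <;> simp_all [pvQ, List.append_assoc]
    · cases b <;>
        simp only [hc, if_neg, reduceIte, if_true, if_false, Bool.not_false, Bool.not_true, ite_false, ite_true] <;>
        (rw [ih _ _ _ (by simp_all)]; simp_all [pvQ, hc, List.append_assoc])

lemma pv_splitOn_ne_nil (cs : List Char) : cs.splitOn '"' ≠ [] := by
  induction cs with
  | nil => simp [List.splitOn, List.splitOnP_nil]
  | cons c cs ih =>
    simp only [List.splitOn, List.splitOnP_cons] at *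
    split
    · simp
    · cases h : List.splitOnP (fun x => x == '"') cs <;> simp [h] at ih ⊢

lemma pvQ_eq_pvG (cs : List Char) : ∀ qc : List Char,
    pvQ false cs qc = pvG false (cs.splitOn '"')
    ∧ pvQ true cs qc = pvG true ((cs.splitOn '"').modifyHead (qc ++ ·)) := by
  induction cs with
  | nil => intro qc; simp [pvQ, pvG, List.splitOn, List.splitOnP_nil]
  | cons c cs ih =>
    intro qc
    by_cases hc : c = '"'
    · have hne := pv_splitOn_ne_nil cs
      obtain ⟨p, ps, hP⟩ : ∃ p ps, cs.splitOn '"' = p :: ps := by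
        cases h : cs.splitOn '"' with
        | nil => exact absurd h hne
        | cons p ps => exact ⟨p, ps, rfl⟩
      constructor
      · simp only [pvQ, hc, if_pos rfl, if_pos trivial]
        have := (ih ([] : List Char)).2
        simp only [List.splitOn, List.splitOnP_cons] at *
        simp_all [pvG]
      · simp only [pvQ, hc, if_pos rfl]
        have := (ih ([] : List Char)).1
        simp only [List.splitOn, List.splitOnP_cons] at *
        simp_all [pvG]
    · obtain ⟨p, ps, hP⟩ : ∃ p ps, cs.splitOn '"' = p :: ps := by
        cases h : cs.splitOn '"' with
        | nil => exact absurd h (pv_splitOn_ne_nil cs)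
        | cons p ps => exact ⟨p, ps, rfl⟩
      have hsplit : (c :: cs).splitOn '"' = (c :: p) :: ps := by
        simp only [List.splitOn, List.splitOnP_cons] at *
        simp [hc, hP]
      constructor
      · have := (ih qc).1
        rw [hsplit]
        simp only [pvQ, hc]
        cases ps <;> simp_all [pvG]
      · have := (ih (qc ++ [c])).2
        rw [hsplit]
        simp only [pvQ, hc]
        simp_all [pvG, hP]

-- B's indexed-pieces expression equals pvG (k tracks the index offset; k + ps.length = n)
lemma pv_pieces_eq_pvG (n : Nat) : ∀ (ps : List (List Char)) (k : Nat), ps ≠ [] → k + ps.length = n →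
    ((ps.zipIdx k).map (fun (seg, i) =>
        if i % 2 = 0 then seg
        else if i = n - 1 then ['"']
        else '"' :: (PySem.Chars.replace seg [' '] ['_'] ++ ['"']))).flatten
      = if k % 2 = 0 then pvG false ps else '"' :: pvG true ps := by
  intro ps
  induction ps with
  | nil => simp
  | cons p ps ih =>
    intro k _ hk
    rw [List.zipIdx_cons]
    cases ps with
    | nil =>
      have hlast : k = n - 1 := by simp at hk; omega
      by_cases hk2 : k % 2 = 0 <;> simp [pvG, hk2, hlast]
    | cons q qs =>
      have hne : q :: qs ≠ [] := by simp
      simp only [List.length_cons] at hk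
      have hk' : (k + 1) + (q :: qs).length = n := by simp only [List.length_cons]; omega
      have hknot : ¬ k = n - 1 := by omega
      by_cases hk2 : k % 2 = 0
      · have h1 : ¬ (k + 1) % 2 = 0 := by omega
        simp only [List.map_cons, List.flatten_cons, ih (k+1) hne hk', if_neg h1, if_pos hk2, hk2]
        simp [pvG]
      · have h1 : (k + 1) % 2 = 0 := by omega
        simp only [List.map_cons, List.flatten_cons, ih (k+1) hne hk', if_pos h1, if_neg hk2, hk2]
        simp [pvG, hknot]

-- ---- the delimiter pass ----
-- recursive form of A's buffered delimiter loop (b = buffer), returning new_line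
def pvD : List Char → List Char → List Char
  | [], b => b
  | c :: cs, b =>
    if pvDelims.contains c then ' ' :: b ++ ' ' :: c :: ' ' :: pvD cs []
    else pvD cs (b ++ [c])

lemma pvD_foldl (cs : List Char) : ∀ (buf nl : List Char),
    (cs.foldl (fun (st : List Char × List Char) char =>
        if pvDelims.contains char then ([], st.2 ++ [' '] ++ st.1 ++ [' ', char, ' '])
        else (st.1 ++ [char], st.2)) (buf, nl)).2
      ++ (cs.foldl (fun (st : List Char × List Char) char =>
        if pvDelims.contains char then ([], st.2 ++ [' '] ++ st.1 ++ [' ', char, ' '])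
        else (st.1 ++ [char], st.2)) (buf, nl)).1
      = nl ++ pvD cs buf := by
  induction cs with
  | nil => intro buf nl; simp [pvD]
  | cons c cs ih =>
    intro buf nl
    rw [List.foldl_cons]
    by_cases hc : pvDelims.contains c
    · have hm : c ∈ pvDelims := by simpa using hc
      simp only [hc, reduceIte, ite_true]
      rw [ih]
      simp [pvD, hc, hm, List.append_assoc]
    · have hm : c ∉ pvDelims := by simpa using hc
      simp only [hc, reduceIte, ite_false, Bool.false_eq_true]
      rw [ih]
      simp [pvD, hc, hm, List.append_assoc]

-- ---- Python str.split(): words are invariant under the extra spaces A inserts ----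
-- accumulator-state characterisation of PySem.Chars.split₀.go
def pvAcc : List Char → List Char → List (List Char) → List (List Char)
  | [], cur, acc => if cur.isEmpty then acc else cur.reverse :: acc
  | c :: rest, cur, acc =>
    if PySem.Chars.isspace c then
      if cur.isEmpty then pvAcc rest [] acc else pvAcc rest [] (cur.reverse :: acc)
    else pvAcc rest (c :: cur) acc

lemma pv_go_eq_pvAcc (s : List Char) : ∀ cur acc,
    PySem.Chars.split₀.go s cur acc = (pvAcc s cur acc).reverse := by
  induction s with
  | nil => intro cur acc; by_cases h : cur.isEmpty <;> simp [PySem.Chars.split₀.go, pvAcc, h]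
  | cons c rest ih =>
    intro cur acc
    by_cases h : PySem.Chars.isspace c
    · by_cases h2 : cur.isEmpty <;> simp [PySem.Chars.split₀.go, pvAcc, h, h2, ih]
    · simp [PySem.Chars.split₀.go, pvAcc, h, ih]

lemma pvAcc_append (s : List Char) : ∀ cur acc, pvAcc s cur acc = pvAcc s cur [] ++ acc := by
  induction s with
  | nil => intro cur acc; by_cases h : cur.isEmpty <;> simp [pvAcc, h]
  | cons c rest ih =>
    intro cur acc
    by_cases h : PySem.Chars.isspace c
    · by_cases h2 : cur.isEmpty
      · simp only [pvAcc, h, if_pos rfl, if_pos h2, ite_true]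
        rw [ih [] acc]
      · simp only [pvAcc, h, if_pos rfl, if_neg h2, ite_true, ite_false]
        rw [ih [] (cur.reverse :: acc), ih [] [cur.reverse]]
        simp
    · simp only [pvAcc, h, ite_false, Bool.false_eq_true, reduceIte]
      rw [ih (c :: cur) acc]

lemma pvAcc_space (x y : List Char) : ∀ cur acc,
    pvAcc (x ++ ' ' :: y) cur acc = pvAcc y [] [] ++ pvAcc x cur acc := by
  induction x with
  | nil =>
    intro cur acc
    by_cases h2 : cur.isEmpty
    · rw [List.nil_append, show pvAcc (' ' :: y) cur acc = pvAcc y [] acc from by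
        simp [pvAcc, h2, show PySem.Chars.isspace ' ' = true from rfl]]
      rw [pvAcc_append y [] acc]
      simp [pvAcc, h2]
    · rw [List.nil_append, show pvAcc (' ' :: y) cur acc = pvAcc y [] (cur.reverse :: acc) from by
        simp [pvAcc, h2, show PySem.Chars.isspace ' ' = true from rfl]]
      rw [pvAcc_append y [] (cur.reverse :: acc)]
      simp [pvAcc, h2]
  | cons c rest ih =>
    intro cur acc
    by_cases h : PySem.Chars.isspace c
    · by_cases h2 : cur.isEmpty <;> simp [pvAcc, h, h2, ih]
    · simp [pvAcc, h, ih]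

-- split() distributes over a separating space
lemma pv_split₀_space (x y : List Char) :
    PySem.Chars.split₀ (x ++ ' ' :: y) = PySem.Chars.split₀ x ++ PySem.Chars.split₀ y := by
  show PySem.Chars.split₀.go _ [] [] = PySem.Chars.split₀.go _ [] [] ++ PySem.Chars.split₀.go _ [] []
  rw [pv_go_eq_pvAcc, pv_go_eq_pvAcc, pv_go_eq_pvAcc, pvAcc_space]
  simp

lemma pv_split₀_cons_space (y : List Char) :
    PySem.Chars.split₀ (' ' :: y) = PySem.Chars.split₀ y := by
  have h := pv_split₀_space [] y
  simpa using h

lemma pv_split₀_space3 (x y : List Char) (c : Char) :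
    PySem.Chars.split₀ (x ++ [' ', c, ' '] ++ y)
      = PySem.Chars.split₀ x ++ PySem.Chars.split₀ [c] ++ PySem.Chars.split₀ y := by
  have e : x ++ [' ', c, ' '] ++ y = x ++ ' ' :: ([c] ++ ' ' :: y) := by simp
  rw [e, pv_split₀_space, pv_split₀_space, List.append_assoc]

-- words of A's padded line = words of B's padded line
lemma pv_split₀_pvD (cs : List Char) : ∀ b : List Char,
    PySem.Chars.split₀ (pvD cs b)
      = PySem.Chars.split₀ (b ++ cs.flatMap (fun c =>
          if pvDelims.contains c then [' ', c, ' '] else [c])) := by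
  induction cs with
  | nil => intro b; simp [pvD]
  | cons c cs ih =>
    intro b
    by_cases hc : pvDelims.contains c
    · simp only [pvD, if_pos hc, List.flatMap_cons, if_pos hc]
      have e1 : (' ' :: b ++ ' ' :: c :: ' ' :: pvD cs [])
          = (' ' :: b) ++ [' ', c, ' '] ++ pvD cs [] := by simp
      have e2 : b ++ ([' ', c, ' '] ++ cs.flatMap (fun c =>
            if pvDelims.contains c then [' ', c, ' '] else [c]))
          = b ++ [' ', c, ' '] ++ cs.flatMap (fun c =>
            if pvDelims.contains c then [' ', c, ' '] else [c]) := by simp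
      rw [e1, e2, pv_split₀_space3, pv_split₀_space3, pv_split₀_cons_space, ih []]
      simp
    · simp only [pvD, if_neg hc, List.flatMap_cons, if_neg hc]
      rw [ih (b ++ [c])]
      simp

-- ---- per-line equality ----
lemma pv_line_eq (line : List Char) :
    PySem.Chars.join [' '] (PySem.Chars.split₀ (pvD (pvQ false line []) []))
      = altCleanLine line := by
  have hq : pvQ false line [] = pvG false (line.splitOn '"') := (pvQ_eq_pvG line []).1
  have hp := pv_pieces_eq_pvG (line.splitOn '"').length (line.splitOn '"') 0
      (pv_splitOn_ne_nil line) (by simp)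
  simp only [Nat.zero_mod, if_pos rfl, ite_true] at hp
  unfold altCleanLine
  rw [pv_split₀_pvD, hq, List.nil_append, ← hp]
  rw [show (['+','-','*','/','^','=','<','>',',','(',')',':'] : List Char) = pvDelims from rfl]

-- the outer line loop, with A's exact per-line body
lemma pv_outer (lines : List (List Char)) : ∀ acc : List (List Char),
    lines.foldl (fun acc line =>
      if PySem.Chars.isIn ['R','E','M'] line then acc
      else
        let st := line.foldl (fun (st : Bool × List Char × List Char) char =>
          if char = '"' then
            if !st.1 then (true, st.2.1 ++ ['"'], st.2.2)
            else (false, st.2.1 ++ PySem.Chars.replace st.2.2 [' '] ['_'] ++ ['"'], [])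
          else if st.1 then (st.1, st.2.1, st.2.2 ++ [char])
          else (st.1, st.2.1 ++ [char], st.2.2)) (false, [], [])
        let processed_line := st.2.1
        let st2 := processed_line.foldl (fun (st : List Char × List Char) char =>
          if (['+','-','*','/','^','=','<','>',',','(',')',':'] : List Char).contains char then
            ([], st.2 ++ [' '] ++ st.1 ++ [' ', char, ' '])
          else (st.1 ++ [char], st.2)) ([], [])
        let new_line := st2.2 ++ st2.1
        acc ++ [PySem.Chars.join [' '] (PySem.Chars.split₀ new_line)]) acc
    = acc ++ (lines.filter (fun l => !PySem.Chars.isIn ['R','E','M'] l)).map altCleanLine := by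
  induction lines with
  | nil => intro acc; simp
  | cons line rest ih =>
    intro acc
    rw [List.foldl_cons]
    by_cases h : PySem.Chars.isIn ['R','E','M'] line
    · simp only [h, ite_true, reduceIte]
      rw [ih acc]
      simp [h]
    · simp only [h, ite_false, Bool.false_eq_true, reduceIte]
      rw [ih]
      simp only [List.filter_cons, h, Bool.not_false, ite_true, List.map_cons, reduceIte]
      rw [show (['+','-','*','/','^','=','<','>',',','(',')',':'] : List Char) = pvDelims from rfl]
      rw [pvQ_foldl line false [] [] (fun _ => rfl)]
      rw [pvD_foldl (([] : List Char) ++ pvQ false line []) [] []]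
      simp [pv_line_eq]

-- ===== VERDICT (by name: the statement is the Claim_ definition above) =====
theorem preprocess_string_spec : Claim_equal_preprocess_string := by
  intro basic_code _
  unfold Spec_preprocess_string preprocess_string preprocess_string_alt
  dsimp only
  rw [pv_outer, List.nil_append]
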